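-- pv_equiv track=rewrite | github.com/smith-cameron/AlgorithmBible | python/03-Arrays/03-arrays.py | nThLast
-- ===== SOURCE A (Python) =====
-- def nThLast(list, index):
--     count = 1
--     if len(list) < 2:
--         return None
--     for i in range(len(list)-1,0,-1):
--         if count == index:
--             return list[i]
--         else:
--             count += 1
-- ===== SOURCE B (Python) =====
-- def nThLast(list, index):
--     if index < 1 or index >= len(list):
--         return None
--     return list[len(list) - index]
-- ===== Notes on version B (the rewrite author's own statement) =====
-- stated objective: simpler
-- what changed: Replaces the backward counting loop with a bounds check and a single direct index lookup list[len(list)-index].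
import Mathlib
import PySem

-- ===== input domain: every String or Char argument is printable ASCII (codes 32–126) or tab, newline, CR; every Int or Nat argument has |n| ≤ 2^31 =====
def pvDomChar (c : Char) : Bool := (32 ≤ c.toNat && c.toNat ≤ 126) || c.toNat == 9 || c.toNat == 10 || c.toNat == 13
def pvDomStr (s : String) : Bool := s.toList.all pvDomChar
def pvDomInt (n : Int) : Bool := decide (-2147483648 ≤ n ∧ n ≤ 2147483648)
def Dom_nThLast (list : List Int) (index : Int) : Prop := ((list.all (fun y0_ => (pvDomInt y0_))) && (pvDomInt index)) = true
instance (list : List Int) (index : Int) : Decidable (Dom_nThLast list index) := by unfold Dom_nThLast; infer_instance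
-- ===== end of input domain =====

-- ===== PORT A =====
-- the backward counting loop: for i in range(len-1, 0, -1): if count == index: return list[i]; count += 1
def nThLastLoop (list : List Int) (index : Int) : List Int → Int → Option Int
  | [], _ => none
  | i :: rest, count =>
    if count = index then PySem.List.pyGet? list i
    else nThLastLoop list index rest (count + 1)

def nThLast (list : List Int) (index : Int) : Option Int :=
  if (list.length : Int) < 2 then none
  else nThLastLoop list index (PySem.List.pyRange ((list.length : Int) - 1) 0 (-1)) 1

-- ===== PORT B =====
-- B: bounds check + one direct lookup (simpler; no loop)
def nThLast_alt (list : List Int) (index : Int) : Option Int :=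
  if index < 1 ∨ (list.length : Int) ≤ index then none
  else PySem.List.pyGet? list ((list.length : Int) - index)

-- ===== PRECONDITION & SPEC =====
def Spec_nThLast (list : List Int) (index : Int) (out : Option Int) : Prop := out = nThLast_alt list index
instance (list : List Int) (index : Int) (out : Option Int) : Decidable (Spec_nThLast list index out) := by unfold Spec_nThLast; infer_instance

-- ===== CLAIM (what is proved, stated in full; the proofs are below) =====
def Claim_equal_nThLast : Prop := ∀ (list : List Int) (index : Int), Dom_nThLast list index → Spec_nThLast list index (nThLast list index)

-- ===== LEMMAS AND PROOFS =====
theorem nThLastLoop_range (list : List Int) (index : Int) (k : Nat) (c : Int) :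
    nThLastLoop list index (PySem.List.pyRange (k : Int) 0 (-1)) c =
      if c ≤ index ∧ index < c + k then PySem.List.pyGet? list (c + (k : Int) - index) else none := by
  induction k generalizing c with
  | zero =>
    rw [PySem.List.pyRange_neg_one_eq_nil (by norm_num)]
    simp [nThLastLoop]
  | succ k ih =>
    rw [show ((k + 1 : Nat) : Int) = (k : Int) + 1 by push_cast; ring,
        PySem.List.pyRange_neg_one_cons (by positivity)]
    simp only [nThLastLoop]
    by_cases hc : c = index
    · subst hc
      rw [if_pos rfl, if_pos (by constructor <;> omega)]
      congr 1; ring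
    · rw [if_neg hc, show (k : Int) + 1 - 1 = (k : Int) by ring, ih (c + 1)]
      by_cases h : c + 1 ≤ index ∧ index < c + 1 + k
      · rw [if_pos h, if_pos (by omega)]
        congr 1; ring
      · rw [if_neg h, if_neg (by omega)]

-- ===== VERDICT (by name: the statement is the Claim_ definition above) =====
theorem nThLast_spec : Claim_equal_nThLast := by
  intro list index _
  unfold Spec_nThLast nThLast nThLast_alt
  by_cases hlen : (list.length : Int) < 2
  · rw [if_pos hlen, if_pos (by omega)]
  · rw [if_neg hlen,
        show (list.length : Int) - 1 = ((list.length - 1 : Nat) : Int) by omega,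
        nThLastLoop_range]
    by_cases h : index < 1 ∨ (list.length : Int) ≤ index
    · rw [if_neg (by omega), if_pos h]
    · rw [if_pos (by omega), if_neg h]
      congr 1
      omega
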